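-- pv_equiv track=rewrite | github.com/dkellam52/N-Step-Scan | n_step_scan.py | n_step_look
-- ===== SOURCE A (Python) =====
-- def n_step_look(requests, n):
--     total_movement = 0
--     current_position = 0
--     direction = 1  # Start moving towards higher block numbers
--     processed_groups = []
--
--     for i in range(0, len(requests), n):
--         # Create a group of up to N requests
--         group = requests[i:i+n]
--
--         # Sort group based on current direction
--         group.sort(reverse=direction < 0)
--
--         # Process the group
--         for request in group:
--             total_movement += abs(current_position - request)
--             current_position = request
--
--         processed_groups.append((group, 'High to Low' if direction < 0 else 'Low to High'))
--         direction *= -1  # Change direction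
--
--     return processed_groups, total_movement
-- ===== SOURCE B (Python) =====
-- def n_step_look(requests, n):
--     groups = []
--     ascending = True
--     for i in range(0, len(requests), n):
--         groups.append((sorted(requests[i:i+n], reverse=not ascending),
--                        'Low to High' if ascending else 'High to Low'))
--         ascending = not ascending
--     # Each group is visited in monotone order, so its internal movement
--     # telescopes to the spread |g[0]-g[-1]|: O(1) per group from endpoints.
--     total = 0
--     pos = 0
--     for g, _ in groups:
--         if g:
--             total += abs(pos - g[0]) + abs(g[0] - g[-1])
--             pos = g[-1]
--     return groups, total
-- ===== Notes on version B (the rewrite author's own statement) =====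
-- stated objective: alternative
-- what changed: B computes each group's internal movement in O(1) from its endpoints (|pos-g[0]| + |g[0]-g[-1]|), using that a sorted group is visited monotonically so the per-element distance sum telescopes to the spread, instead of A's fused per-element accumulation of |current_position - request| inside the grouping loop.
import Mathlib
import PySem

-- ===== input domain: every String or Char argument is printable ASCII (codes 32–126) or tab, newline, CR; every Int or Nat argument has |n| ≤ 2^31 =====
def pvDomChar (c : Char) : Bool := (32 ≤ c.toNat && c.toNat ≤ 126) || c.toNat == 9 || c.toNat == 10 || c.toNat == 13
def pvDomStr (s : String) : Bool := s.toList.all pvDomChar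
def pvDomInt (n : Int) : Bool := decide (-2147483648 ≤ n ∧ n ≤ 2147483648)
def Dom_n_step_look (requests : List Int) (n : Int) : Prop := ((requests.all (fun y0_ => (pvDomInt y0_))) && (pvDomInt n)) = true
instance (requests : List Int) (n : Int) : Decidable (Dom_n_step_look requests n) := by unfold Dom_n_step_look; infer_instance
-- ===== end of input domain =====

-- B computes each group's internal movement in O(1) from the sorted group's endpoints
-- (the monotone visit order telescopes the per-element distance sum to the spread),
-- instead of A's per-element accumulation (objective: alternative; same asymptotic cost).

-- ===== PORT A =====
def n_step_look (requests : List Int) (n : Int) : (List (List Int × String)) × Int :=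
  let st := (PySem.List.pyRange 0 requests.length n).foldl
    (fun (st : Int × Int × Int × List (List Int × String)) i =>
      let group := PySem.List.sorted (PySem.List.slice requests (some i) (some (i + n)))
                     (fun x => x) (decide (st.2.2.1 < 0))
      let tp := group.foldl (fun (tp : Int × Int) r => (tp.1 + |tp.2 - r|, r)) (st.1, st.2.1)
      (tp.1, tp.2, st.2.2.1 * (-1),
       st.2.2.2 ++ [(group, if st.2.2.1 < 0 then "High to Low" else "Low to High")]))
    (0, 0, 1, [])
  (st.2.2.2, st.1)

-- ===== PORT B =====
-- g[0] / g[-1] under the `if g:` nonempty guard are ported as headI / getLastI.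
def n_step_look_alt (requests : List Int) (n : Int) : (List (List Int × String)) × Int :=
  let st := (PySem.List.pyRange 0 requests.length n).foldl
    (fun (st : Bool × List (List Int × String)) i =>
      (!st.1,
       st.2 ++ [(PySem.List.sorted (PySem.List.slice requests (some i) (some (i + n)))
                   (fun x => x) (!st.1),
                 if st.1 then "Low to High" else "High to Low")]))
    (true, [])
  let tp := st.2.foldl
    (fun (tp : Int × Int) (g : List Int × String) =>
      if g.1 ≠ [] then
        (tp.1 + |tp.2 - g.1.headI| + |g.1.headI - g.1.getLastI|, g.1.getLastI)
      else tp) (0, 0)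
  (st.2, tp.1)

-- ===== PRECONDITION & SPEC =====
-- Pre_ excludes exactly n = 0, where Python's range(0, len, 0) raises ValueError in A.
def Pre_n_step_look (requests : List Int) (n : Int) : Prop := n ≠ 0
instance (requests : List Int) (n : Int) : Decidable (Pre_n_step_look requests n) := by unfold Pre_n_step_look; infer_instance
def pvWitness_n_step_look : List Int × Int := ([5, 1, 9, 3, 2, 8], 2)

def Spec_n_step_look (requests : List Int) (n : Int) (out : (List (List Int × String)) × Int) : Prop := out = n_step_look_alt requests n
instance (requests : List Int) (n : Int) (out : (List (List Int × String)) × Int) : Decidable (Spec_n_step_look requests n out) := by unfold Spec_n_step_look; infer_instance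

-- ===== CLAIM =====
def Claim_equal_n_step_look : Prop := ∀ (requests : List Int) (n : Int), Dom_n_step_look requests n → Pre_n_step_look requests n → Spec_n_step_look requests n (n_step_look requests n)

-- ===== LEMMAS AND PROOFS =====

/-- Total movement along a path starting at `p` and visiting `xs` in order. -/
def pvD (p : Int) : List Int → Int
  | [] => 0
  | x :: xs => |p - x| + pvD x xs

/-- Final position after starting at `p` and visiting `xs`. -/
def pvLast (p : Int) : List Int → Int
  | [] => p
  | x :: xs => pvLast x xs

/-- A's step with the inner loop replaced by `pvD`/`pvLast`. -/
def pvStepA (requests : List Int) (n : Int)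
    (st : Int × Int × Int × List (List Int × String)) (i : Int) :
    Int × Int × Int × List (List Int × String) :=
  let group := PySem.List.sorted (PySem.List.slice requests (some i) (some (i + n)))
                 (fun x => x) (decide (st.2.2.1 < 0))
  (st.1 + pvD st.2.1 group, pvLast st.2.1 group, -st.2.2.1,
   st.2.2.2 ++ [(group, if st.2.2.1 < 0 then "High to Low" else "Low to High")])

/-- B's group-building step. -/
def pvStepB (requests : List Int) (n : Int)
    (st : Bool × List (List Int × String)) (i : Int) :
    Bool × List (List Int × String) :=
  (!st.1,
   st.2 ++ [(PySem.List.sorted (PySem.List.slice requests (some i) (some (i + n)))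
               (fun x => x) (!st.1),
             if st.1 then "Low to High" else "High to Low")])

/-- Monotone-sortedness of a group (ascending or descending). -/
def pvMono (g : List Int) : Prop :=
  List.Pairwise (fun a b => a ≤ b) g ∨ List.Pairwise (fun a b => b ≤ a) g

lemma pvD_append (p : Int) (xs ys : List Int) :
    pvD p (xs ++ ys) = pvD p xs + pvD (pvLast p xs) ys := by
  induction xs generalizing p with
  | nil => simp [pvD, pvLast]
  | cons x xs ih => simp [pvD, pvLast, ih, add_assoc]

lemma pvLast_append (p : Int) (xs ys : List Int) :
    pvLast p (xs ++ ys) = pvLast (pvLast p xs) ys := by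
  induction xs generalizing p with
  | nil => rfl
  | cons x xs ih => simp [pvLast, ih]

/-- A's inner per-group loop computes the distance sum and the final position. -/
lemma inner_fold (g : List Int) (t p : Int) :
    g.foldl (fun (tp : Int × Int) r => (tp.1 + |tp.2 - r|, r)) (t, p)
      = (t + pvD p g, pvLast p g) := by
  induction g generalizing t p with
  | nil => simp [pvD, pvLast]
  | cons x xs ih => simp [pvD, pvLast, ih, add_assoc]

/-- A's literal step function equals the `pvStepA` form. -/
lemma stepA_eq (requests : List Int) (n : Int)
    (st : Int × Int × Int × List (List Int × String)) (i : Int) :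
    (let group := PySem.List.sorted (PySem.List.slice requests (some i) (some (i + n)))
                    (fun x => x) (decide (st.2.2.1 < 0))
     let tp := group.foldl (fun (tp : Int × Int) r => (tp.1 + |tp.2 - r|, r)) (st.1, st.2.1)
     (tp.1, tp.2, st.2.2.1 * (-1),
      st.2.2.2 ++ [(group, if st.2.2.1 < 0 then "High to Low" else "Low to High")]))
      = pvStepA requests n st i := by
  simp [pvStepA, inner_fold]

lemma pvLast_eq_getLastI (tl : List Int) (a : Int) :
    pvLast a tl = (a :: tl).getLastI := by
  induction tl generalizing a with
  | nil => rfl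
  | cons b t ih =>
    show pvLast b t = (a :: b :: t).getLastI
    rw [ih b, List.getLastI_eq_getLast?_getD, List.getLastI_eq_getLast?_getD, List.getLast?_cons_cons]

lemma pvD_asc : ∀ (tl : List Int) (a : Int), List.Pairwise (fun x y => x ≤ y) (a :: tl) →
    pvD a tl = pvLast a tl - a ∧ a ≤ pvLast a tl := by
  intro tl
  induction tl with
  | nil => intro a _; simp [pvD, pvLast]
  | cons b t ih =>
    intro a h
    have hab : a ≤ b := (List.pairwise_cons.mp h).1 b (by simp)
    obtain ⟨h1, h2⟩ := ih b (List.pairwise_cons.mp h).2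
    refine ⟨?_, le_trans hab h2⟩
    simp only [pvD, pvLast, h1, abs_of_nonpos (by omega : a - b ≤ 0)]
    omega

lemma pvD_desc : ∀ (tl : List Int) (a : Int), List.Pairwise (fun x y => y ≤ x) (a :: tl) →
    pvD a tl = a - pvLast a tl ∧ pvLast a tl ≤ a := by
  intro tl
  induction tl with
  | nil => intro a _; simp [pvD, pvLast]
  | cons b t ih =>
    intro a h
    have hab : b ≤ a := (List.pairwise_cons.mp h).1 b (by simp)
    obtain ⟨h1, h2⟩ := ih b (List.pairwise_cons.mp h).2
    refine ⟨?_, le_trans h2 hab⟩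
    simp only [pvD, pvLast, h1, abs_of_nonneg (by omega : (0:Int) ≤ a - b)]
    omega

/-- B's endpoint formula computes the path distance/final position on a monotone group. -/
lemma endpoint_step (g : List Int) (t p : Int) (hm : pvMono g) :
    (if g ≠ [] then (t + |p - g.headI| + |g.headI - g.getLastI|, g.getLastI) else (t, p))
      = (t + pvD p g, pvLast p g) := by
  cases g with
  | nil => simp [pvD, pvLast]
  | cons a tl =>
    simp only [ne_eq, reduceCtorEq, not_false_iff, if_true, List.headI]
    rw [← pvLast_eq_getLastI]
    have : pvD p (a :: tl) = |p - a| + pvD a tl := rfl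
    have hl : pvLast p (a :: tl) = pvLast a tl := rfl
    rcases hm with h | h
    · obtain ⟨h1, h2⟩ := pvD_asc tl a h
      rw [this, hl, h1, abs_of_nonpos (by omega : a - pvLast a tl ≤ 0)]
      exact congrArg₂ Prod.mk (by ring) rfl
    · obtain ⟨h1, h2⟩ := pvD_desc tl a h
      rw [this, hl, h1, abs_of_nonneg (by omega : (0:Int) ≤ a - pvLast a tl)]
      exact congrArg₂ Prod.mk (by ring) rfl

/-- Every group produced by B's builder is monotone. -/
lemma groups_mono (requests : List Int) (n : Int) :
    ∀ (idxs : List Int) (st : Bool × List (List Int × String)),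
      (∀ g ∈ st.2, pvMono g.1) →
      ∀ g ∈ (idxs.foldl (pvStepB requests n) st).2, pvMono g.1 := by
  intro idxs
  induction idxs with
  | nil => intro st h; exact h
  | cons i idxs ih =>
    intro st h
    refine ih _ ?_
    intro g hg
    rcases List.mem_append.mp hg with hg | hg
    · exact h g hg
    · simp only [List.mem_singleton] at hg
      subst hg
      cases hb : (!st.1) with
      | false => exact Or.inl (by simpa [hb] using
          PySem.List.sorted_pairwise (PySem.List.slice requests (some i) (some (i + n))) (fun x => x))
      | true => exact Or.inr (by simpa [hb] using
          PySem.List.sorted_pairwise_rev (PySem.List.slice requests (some i) (some (i + n))) (fun x => x))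

/-- B's second pass over monotone groups computes the total path distance. -/
lemma second_pass (gs : List (List Int × String)) :
    (∀ g ∈ gs, pvMono g.1) → ∀ (t p : Int),
    gs.foldl (fun (tp : Int × Int) (g : List Int × String) =>
        if g.1 ≠ [] then
          (tp.1 + |tp.2 - g.1.headI| + |g.1.headI - g.1.getLastI|, g.1.getLastI)
        else tp) (t, p)
      = (t + pvD p (gs.flatMap (fun g => g.1)), pvLast p (gs.flatMap (fun g => g.1))) := by
  induction gs with
  | nil => intro _ t p; simp [pvD, pvLast]
  | cons g gs ih =>
    intro h t p
    simp only [List.foldl_cons, List.flatMap_cons]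
    have hstep := endpoint_step g.1 t p (h g (by simp))
    rw [hstep, ih (fun g hg => h g (by simp [hg])), pvD_append, pvLast_append]
    simp [add_assoc]

/-- Main invariant: A's fused fold tracks B's group-building fold via `pvD`/`pvLast`. -/
lemma look_invariant (requests : List Int) (n : Int) :
    ∀ (idxs : List Int) (b : Bool) (gs : List (List Int × String)),
      idxs.foldl (pvStepA requests n)
        (pvD 0 (gs.flatMap (fun g => g.1)), pvLast 0 (gs.flatMap (fun g => g.1)),
         (if b then 1 else -1), gs)
      = (let r := idxs.foldl (pvStepB requests n) (b, gs)
         (pvD 0 (r.2.flatMap (fun g => g.1)), pvLast 0 (r.2.flatMap (fun g => g.1)),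
          (if r.1 then 1 else -1), r.2)) := by
  intro idxs
  induction idxs with
  | nil => intro b gs; simp
  | cons i idxs ih =>
    intro b gs
    simp only [List.foldl_cons]
    have hA : pvStepA requests n
        (pvD 0 (gs.flatMap (fun g => g.1)), pvLast 0 (gs.flatMap (fun g => g.1)),
         (if b then 1 else -1), gs) i
        = (pvD 0 ((pvStepB requests n (b, gs) i).2.flatMap (fun g => g.1)),
           pvLast 0 ((pvStepB requests n (b, gs) i).2.flatMap (fun g => g.1)),
           (if !b then 1 else -1), (pvStepB requests n (b, gs) i).2) := by
      cases b <;>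
        simp [pvStepA, pvStepB, pvD_append, pvLast_append]
    rw [hA]
    have hB : (pvStepB requests n (b, gs) i).1 = !b := rfl
    have := ih (!b) (pvStepB requests n (b, gs) i).2
    rw [← hB] at this
    exact this

-- ===== VERDICT =====
theorem n_step_look_spec : Claim_equal_n_step_look := by
  intro requests n _ _
  unfold Spec_n_step_look n_step_look n_step_look_alt
  have hfA : (PySem.List.pyRange 0 requests.length n).foldl
      (fun (st : Int × Int × Int × List (List Int × String)) i =>
        let group := PySem.List.sorted (PySem.List.slice requests (some i) (some (i + n)))
                       (fun x => x) (decide (st.2.2.1 < 0))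
        let tp := group.foldl (fun (tp : Int × Int) r => (tp.1 + |tp.2 - r|, r)) (st.1, st.2.1)
        (tp.1, tp.2, st.2.2.1 * (-1),
         st.2.2.2 ++ [(group, if st.2.2.1 < 0 then "High to Low" else "Low to High")]))
      (0, 0, 1, [])
      = (PySem.List.pyRange 0 requests.length n).foldl (pvStepA requests n) (0, 0, 1, []) :=
    List.foldl_ext _ _ _ (fun st i _ => stepA_eq requests n st i)
  have hfB : (PySem.List.pyRange 0 requests.length n).foldl
        (fun (st : Bool × List (List Int × String)) i =>
          (!st.1,
           st.2 ++ [(PySem.List.sorted (PySem.List.slice requests (some i) (some (i + n)))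
                       (fun x => x) (!st.1),
                     if st.1 then "Low to High" else "High to Low")]))
        (true, [])
      = (PySem.List.pyRange 0 requests.length n).foldl (pvStepB requests n) (true, []) :=
    List.foldl_ext _ _ _ (fun st i _ => rfl)
  simp only [hfA, hfB]
  have key := look_invariant requests n (PySem.List.pyRange 0 requests.length n) true []
  simp only [List.flatMap_nil, pvD, pvLast, if_true] at key
  rw [key]
  simp only []
  set r := (PySem.List.pyRange 0 requests.length n).foldl (pvStepB requests n) (true, [])
  have hmono := groups_mono requests n (PySem.List.pyRange 0 requests.length n) (true, [])
    (by intro g hg; simp at hg)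
  have hsp := second_pass r.2 hmono 0 0
  rw [hsp]
  simp
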